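-- pv_equiv track=rewrite | github.com/LU1IN001/S1_TME-TD | Activité-8/ACT8.py | diff_mois_en_jour
-- ===== SOURCE A (Python) =====
-- from typing import List, Tuple, Dict, Optional, TypeVar, Callable
--
-- def diff_mois(ori: int, month: int) -> int:
--     """Préconditions ori <= 12 and month <= 12
--     Retourne la différence entre deux mois dernier mois non inclus"""
--     if ori > month:
--         return month + 12 - ori
--     else:
--         return month - ori
--
-- def diff_mois_en_jour(ori: int, month: int) -> int:
--     """Préconditions ori <= 12 and month <= 12
--     Retourne la différence en jour des deux mois données dernier mois non inclus"""
--     index_to_move: int = diff_mois(ori, month)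
--     # Listes des jours dans le mois
--     month_to_day: List[int] = [31, 28, 31, 30, 31, 30, 31, 31, 30, 31, 30, 31]
--     res: int = 0
--     i: int
--     for i in range(index_to_move):
--         res = res + month_to_day[(ori-1+i)%12]
--     return res
-- ===== SOURCE B (Python) =====
-- _CUM = [0, 31, 59, 90, 120, 151, 181, 212, 243, 273, 304, 334, 365,
--         396, 424, 455, 485, 516, 546, 577, 608, 638, 669]
--
-- def diff_mois_en_jour(ori: int, month: int) -> int:
--     n = month - ori if ori <= month else month + 12 - ori
--     if n <= 0:
--         return 0
--     s = (ori - 1) % 12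
--     q, r = divmod(n, 12)
--     return q * 365 + _CUM[s + r] - _CUM[s]
-- ===== Notes on version B (the rewrite author's own statement) =====
-- stated objective: faster
-- what changed: Replaced the per-month accumulating loop by an O(1) closed form: a precomputed 23-entry prefix-sum table of month lengths, with the month count split as n = 12*q + r so the answer is q*365 + cum[s+r] - cum[s].
import Mathlib
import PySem

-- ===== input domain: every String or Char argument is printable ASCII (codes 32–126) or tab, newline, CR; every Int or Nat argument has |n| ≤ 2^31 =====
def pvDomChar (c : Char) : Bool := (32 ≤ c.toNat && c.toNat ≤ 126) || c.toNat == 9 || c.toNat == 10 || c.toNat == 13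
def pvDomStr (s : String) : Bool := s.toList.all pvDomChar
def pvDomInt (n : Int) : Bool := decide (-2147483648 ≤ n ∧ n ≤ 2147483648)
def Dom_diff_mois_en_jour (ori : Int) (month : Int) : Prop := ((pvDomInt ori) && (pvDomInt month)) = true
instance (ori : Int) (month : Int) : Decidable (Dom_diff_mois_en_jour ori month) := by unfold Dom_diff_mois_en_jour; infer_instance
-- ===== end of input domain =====

-- B replaces A's per-month accumulating loop by an O(1) prefix-sum closed form (return value only; no side effects involved).

-- ===== PORT A =====
def diff_mois (ori : Int) (month : Int) : Int :=
  if ori > month then month + 12 - ori else month - ori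

def diff_mois_en_jour (ori : Int) (month : Int) : Int :=
  let index_to_move : Int := diff_mois ori month
  let month_to_day : List Int := [31, 28, 31, 30, 31, 30, 31, 31, 30, 31, 30, 31]
  -- the index (ori-1+i) % 12 is always in [0,12), so pyGetD is exact here (no IndexError possible)
  (PySem.List.pyRange 0 index_to_move 1).foldl
    (fun res i => res + PySem.List.pyGetD month_to_day (PySem.Int.mod (ori - 1 + i) 12) 0) 0

-- ===== PORT B =====
def pvCum : List Int :=
  [0, 31, 59, 90, 120, 151, 181, 212, 243, 273, 304, 334, 365,
   396, 424, 455, 485, 516, 546, 577, 608, 638, 669]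

def diff_mois_en_jour_alt (ori : Int) (month : Int) : Int :=
  let n : Int := if ori ≤ month then month - ori else month + 12 - ori
  if n ≤ 0 then 0
  else
    let s : Int := PySem.Int.mod (ori - 1) 12
    let q : Int := PySem.Int.floordiv n 12
    let r : Int := PySem.Int.mod n 12
    -- s + r ≤ 22 < 23 = len(_CUM), so pyGetD is exact here
    q * 365 + PySem.List.pyGetD pvCum (s + r) 0 - PySem.List.pyGetD pvCum s 0

-- ===== PRECONDITION & SPEC =====
def Spec_diff_mois_en_jour (ori : Int) (month : Int) (out : Int) : Prop := out = diff_mois_en_jour_alt ori month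
instance (ori : Int) (month : Int) (out : Int) : Decidable (Spec_diff_mois_en_jour ori month out) := by unfold Spec_diff_mois_en_jour; infer_instance

-- ===== CLAIM (what is proved, stated in full; the proofs are below) =====
def Claim_equal_diff_mois_en_jour : Prop := ∀ (ori : Int) (month : Int), Dom_diff_mois_en_jour ori month → Spec_diff_mois_en_jour ori month (diff_mois_en_jour ori month)

-- ===== LEMMAS AND PROOFS =====

-- one step of A's summand, as a function of the shifted residue
def pvMDay (t : Int) : Int :=
  PySem.List.pyGetD [31, 28, 31, 30, 31, 30, 31, 31, 30, 31, 30, 31] t 0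

def pvCumD (t : Int) : Int := PySem.List.pyGetD pvCum t 0

-- A's loop as a sum over the range, with the start residue factored out
lemma pvMap_shift (ori r : Int) :
    (PySem.List.pyRange 0 r 1).map
      (fun i => pvMDay (PySem.Int.mod (ori - 1 + i) 12)) =
    (PySem.List.pyRange 0 r 1).map
      (fun i => pvMDay (PySem.Int.mod (PySem.Int.mod (ori - 1) 12 + i) 12)) := by
  apply List.map_congr_left
  intro i _
  have h1 := PySem.Int.mod_eq_emod_of_pos (a := ori - 1 + i) (b := 12) (by omega)
  have h2 := PySem.Int.mod_eq_emod_of_pos (a := ori - 1) (b := 12) (by omega)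
  have h3 := PySem.Int.mod_eq_emod_of_pos (a := (ori - 1) % 12 + i) (b := 12) (by omega)
  rw [h1, h2, h3]
  congr 1
  omega

-- a full 12-month window sums to 365, wherever it starts
lemma pvCycle (s a : Int) :
    ((PySem.List.pyRange a (a + 12) 1).map
      (fun i => pvMDay (PySem.Int.mod (s + i) 12))).sum = 365 := by
  have key : ∀ t : Int, 0 ≤ t → t < 12 →
      ((List.range 12).map (fun k : Nat => pvMDay ((t + k) % 12))).sum = 365 := by
    intro t h0 h1
    interval_cases t <;> decide
  have hmap : (PySem.List.pyRange a (a + 12) 1).map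
      (fun i => pvMDay (PySem.Int.mod (s + i) 12)) =
      (List.range 12).map (fun k : Nat => pvMDay (((s + a) % 12 + k) % 12)) := by
    rw [PySem.List.pyRange_one]
    have h12 : (a + 12 - a).toNat = 12 := by omega
    rw [h12, List.map_map]
    apply List.map_congr_left
    intro k hk
    simp only [Function.comp]
    rw [PySem.Int.mod_eq_emod_of_pos (by omega : (0:Int) < 12), Int.emod_add_emod]
    congr 1
    omega
  rw [hmap]
  exact key _ (Int.emod_nonneg _ (by norm_num)) (Int.emod_lt_of_pos _ (by norm_num))

-- peeling whole years off the front of the count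
lemma pvMain (q : Nat) (s r : Int) (hr : 0 ≤ r) :
    ((PySem.List.pyRange 0 (12 * q + r) 1).map
      (fun i => pvMDay (PySem.Int.mod (s + i) 12))).sum =
    q * 365 + ((PySem.List.pyRange 0 r 1).map (fun i => pvMDay (PySem.Int.mod (s + i) 12))).sum := by
  induction q with
  | zero => simp
  | succ k ih =>
    have hsplit : PySem.List.pyRange 0 (12 * (k + 1 : Nat) + r) 1 =
        PySem.List.pyRange 0 (12 * k + r) 1 ++
        PySem.List.pyRange (12 * k + r) ((12 * k + r) + 12) 1 := by
      rw [← PySem.List.pyRange_one_append 0 (12 * k + r) ((12 * k + r) + 12) (by positivity) (by omega)]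
      congr 1
      push_cast
      omega
    rw [hsplit, List.map_append, List.sum_append, ih, pvCycle s _]
    push_cast
    ring

-- the remainder part is a prefix-table difference
lemma pvBase (s r : Int) (hs0 : 0 ≤ s) (hs : s < 12) (hr0 : 0 ≤ r) (hr : r < 12) :
    ((PySem.List.pyRange 0 r 1).map (fun i => pvMDay (PySem.Int.mod (s + i) 12))).sum =
    pvCumD (s + r) - pvCumD s := by
  interval_cases s <;> interval_cases r <;> decide

-- ===== VERDICT (by name: the statement is the Claim_ definition above) =====
theorem diff_mois_en_jour_spec : Claim_equal_diff_mois_en_jour := by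
  intro ori month _
  unfold Spec_diff_mois_en_jour diff_mois_en_jour diff_mois_en_jour_alt diff_mois
  simp only [PySem.List.foldl_add]
  have hn : (if ori > month then month + 12 - ori else month - ori) =
      (if ori ≤ month then month - ori else month + 12 - ori) := by
    by_cases h : ori ≤ month <;> simp [h, lt_iff_not_ge]
  rw [hn]
  set n : Int := if ori ≤ month then month - ori else month + 12 - ori with hdefn
  by_cases hpos : n ≤ 0
  · rw [PySem.List.pyRange_one_eq_nil hpos]
    simp [hpos]
  · rw [not_le] at hpos
    simp only [if_neg (by omega : ¬ n ≤ 0)]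
    rw [show (0:Int) + ((List.map (fun i => PySem.List.pyGetD [(31:Int), 28, 31, 30, 31, 30, 31, 31, 30, 31, 30, 31] (PySem.Int.mod (ori - 1 + i) 12) 0) (PySem.List.pyRange 0 n 1)).sum) = ((PySem.List.pyRange 0 n 1).map (fun i => pvMDay (PySem.Int.mod (ori - 1 + i) 12))).sum by simp [pvMDay]]
    rw [pvMap_shift ori n]
    set s : Int := PySem.Int.mod (ori - 1) 12 with hdefs
    have hs0 : 0 ≤ s := PySem.Int.mod_nonneg _ (by norm_num)
    have hs12 : s < 12 := PySem.Int.mod_lt _ (by norm_num)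
    set q : Int := PySem.Int.floordiv n 12 with hdefq
    set r : Int := PySem.Int.mod n 12 with hdefr
    have hq : q = n / 12 := PySem.Int.floordiv_eq_ediv_of_pos (by norm_num)
    have hr : r = n % 12 := PySem.Int.mod_eq_emod_of_pos (by norm_num)
    have hq0 : 0 ≤ q := by omega
    have hr0 : 0 ≤ r := by omega
    have hr12 : r < 12 := by omega
    have hnqr : 12 * ((q.toNat : Int)) + r = n := by omega
    have := pvMain q.toNat s r hr0
    rw [hnqr] at this
    rw [this, pvBase s r hs0 hs12 hr0 hr12]
    simp only [pvCumD]
    have : ((q.toNat : Int)) = q := by omega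
    rw [this]
    ring
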